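-- pv_equiv track=rewrite | github.com/unit0113/projects | Algorithms/Recursion/longest_stable_subsequence.py | lssLengthEndingHere
-- ===== SOURCE A (Python) =====
-- def lssLengthEndingHere(a, curr):
--     if curr == 0:
--         return 1
--
--     ans = 1
--     for i in range(curr - 1, -1, -1):
--         if abs(a[i] - a[curr]) <= 1:
--             ans = max(ans, 1 + lssLengthEndingHere(a, i))
--     return ans
-- ===== SOURCE B (Python) =====
-- def lssLengthEndingHere(a, curr):
--     if curr <= 0:
--         return 1
--     dp = []
--     for j in range(curr + 1):
--         best = 1
--         for i in range(j):
--             if abs(a[i] - a[j]) <= 1 and best < dp[i] + 1: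
--                 best = dp[i] + 1
--         dp.append(best)
--     return dp[curr]
-- ===== Notes on version B (the rewrite author's own statement) =====
-- stated objective: alternative
-- what changed: Replaced the top-down recursion (recomputing each subproblem at every call) by a bottom-up dynamic-programming table dp[0..curr] filled left to right, reading dp[i] instead of recursing.
import Mathlib
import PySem

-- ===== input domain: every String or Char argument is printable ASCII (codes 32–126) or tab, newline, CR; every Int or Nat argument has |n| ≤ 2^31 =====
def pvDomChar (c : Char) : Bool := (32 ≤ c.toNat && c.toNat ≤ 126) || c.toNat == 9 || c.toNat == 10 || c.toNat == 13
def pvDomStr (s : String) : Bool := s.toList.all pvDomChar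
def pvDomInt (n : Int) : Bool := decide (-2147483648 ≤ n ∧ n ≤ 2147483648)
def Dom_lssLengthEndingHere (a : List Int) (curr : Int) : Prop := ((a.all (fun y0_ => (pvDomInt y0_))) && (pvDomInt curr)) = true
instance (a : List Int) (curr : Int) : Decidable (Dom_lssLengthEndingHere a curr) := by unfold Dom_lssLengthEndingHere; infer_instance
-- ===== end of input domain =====

-- B replaces A's top-down recursion by a bottom-up DP table filled left to right (objective: alternative).


-- ===== PORT A =====
-- A's recursion, on the non-negative index curr (the loop 'for i in range(curr-1,-1,-1)'
-- is the fold over (List.range c).reverse; under Pre_ every access a[i] is in range, so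
-- 'a.getD i 0' is exactly Python's a[i]).
def lssA (a : List Int) (c : Nat) : Int :=
  if c = 0 then 1
  else
    ((List.range c).reverse.attach).foldl
      (fun ans i =>
        if |a.getD i.1 0 - a.getD c 0| ≤ 1 then max ans (1 + lssA a i.1) else ans) 1
termination_by c
decreasing_by
  · have : i.1 ∈ (List.range c).reverse := i.2
    simpa [List.mem_reverse, List.mem_range] using this

def lssLengthEndingHere (a : List Int) (curr : Int) : Int :=
  if curr = 0 then 1
  else if curr < 0 then 1   -- range(curr-1,-1,-1) is empty for curr<0: the loop body never runs, ans stays 1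
  else lssA a curr.toNat

-- ===== PORT B =====
def lssLengthEndingHere_alt (a : List Int) (curr : Int) : Int :=
  if curr ≤ 0 then 1
  else
    let n := curr.toNat
    let dp := (List.range (n + 1)).foldl
      (fun dp j =>
        dp ++ [ (List.range j).foldl
                  (fun best i =>
                    if |a.getD i 0 - a.getD j 0| ≤ 1 ∧ best < dp.getD i 0 + 1
                    then dp.getD i 0 + 1 else best) 1 ]) []
    dp.getD n 1

-- ===== PRECONDITION & SPEC =====
-- Pre_ excludes exactly the inputs where Python A raises IndexError: curr ≥ 1 with curr ≥ len(a).
def Pre_lssLengthEndingHere (a : List Int) (curr : Int) : Prop :=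
  curr ≤ 0 ∨ curr < (a.length : Int)
instance (a : List Int) (curr : Int) : Decidable (Pre_lssLengthEndingHere a curr) := by
  unfold Pre_lssLengthEndingHere; infer_instance
def pvWitness_lssLengthEndingHere : List Int × Int := ([2, 1, 2, 4], 2)

def Spec_lssLengthEndingHere (a : List Int) (curr : Int) (out : Int) : Prop := out = lssLengthEndingHere_alt a curr
instance (a : List Int) (curr : Int) (out : Int) : Decidable (Spec_lssLengthEndingHere a curr out) := by unfold Spec_lssLengthEndingHere; infer_instance

-- ===== CLAIM (what is proved, stated in full; the proofs are below) =====
def Claim_equal_lssLengthEndingHere : Prop := ∀ (a : List Int) (curr : Int), Dom_lssLengthEndingHere a curr → Pre_lssLengthEndingHere a curr → Spec_lssLengthEndingHere a curr (lssLengthEndingHere a curr)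

-- ===== LEMMAS AND PROOFS =====

theorem pv_max_rot (b x y : Int) : max (max b x) y = max (max b y) x := by
  rw [max_assoc, max_comm x y, max_assoc]

theorem pv_foldl_max_pull (l : List Int) : ∀ b x : Int,
    List.foldl max (max b x) l = max (List.foldl max b l) x := by
  induction l with
  | nil => intro b x; rfl
  | cons y l ih =>
    intro b x
    simp only [List.foldl_cons]
    rw [pv_max_rot, ih]

theorem pv_foldl_max_reverse (l : List Int) (b : Int) :
    List.foldl max b l.reverse = List.foldl max b l := by
  induction l generalizing b with
  | nil => rfl
  | cons x l ih =>
    simp only [List.reverse_cons, List.foldl_append, List.foldl_cons, List.foldl_nil]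
    rw [ih, ← pv_foldl_max_pull]

-- A's loop shape as a max-fold over the eligible candidates.
theorem pv_loopA_eq (p : Nat → Prop) [DecidablePred p] (g : Nat → Int) (l : List Nat) :
    ∀ b : Int,
    List.foldl (fun ans i => if p i then max ans (g i) else ans) b l
      = List.foldl max b ((l.filter (fun i => decide (p i))).map g) := by
  induction l with
  | nil => intro b; rfl
  | cons x l ih =>
    intro b
    by_cases h : p x <;> simp [h, ih]

-- B's inner loop shape as the same max-fold.
theorem pv_loopB_eq (p : Nat → Prop) [DecidablePred p] (g : Nat → Int) (l : List Nat) :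
    ∀ b : Int,
    List.foldl (fun best i => if p i ∧ best < g i then g i else best) b l
      = List.foldl max b ((l.filter (fun i => decide (p i))).map g) := by
  induction l with
  | nil => intro b; rfl
  | cons x l ih =>
    intro b
    by_cases h : p x
    · have hacc : (if p x ∧ b < g x then g x else b) = max b (g x) := by
        by_cases h2 : b < g x <;> simp [h, h2] <;> omega
      have hf : List.filter (fun i => decide (p i)) (x :: l)
          = x :: List.filter (fun i => decide (p i)) l := by simp [h]
      rw [List.foldl_cons, hacc, hf, List.map_cons, List.foldl_cons]
      exact ih _
    · simp [h, ih]

theorem pv_foldl_attach {α β : Type} (l : List α) (f : β → α → β) (b : β) :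
    (l.attach).foldl (fun acc i => f acc i.1) b = l.foldl f b :=
  List.foldl_attach

theorem pv_getD_last (l : List Int) (x d : Int) : (l ++ [x]).getD l.length d = x := by
  induction l with
  | nil => rfl
  | cons y l ih => simpa using ih

theorem pv_getD_snoc_range (f : Nat → Int) (n : Nat) (x d : Int) :
    ((List.range n).map f ++ [x]).getD n d = x := by
  have h := pv_getD_last ((List.range n).map f) x d
  simpa using h

theorem pv_getD_map_range (f : Nat → Int) (j i : Nat) (hi : i < j) :
    (((List.range j).map f).getD i 0) = f i := by
  rw [List.getD_eq_getElem?_getD]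
  simp [hi]

theorem pv_if_shift (C : Prop) [Decidable C] (b v : Int) :
    (if C ∧ b < v + 1 then v + 1 else b) = (if C ∧ b < 1 + v then 1 + v else b) := by
  by_cases hC : C
  · have h1 : v + 1 = 1 + v := by omega
    simp only [hC, true_and, h1]
  · simp [hC]

-- unfold lssA (c > 0) to the canonical max-fold over List.range c
theorem pv_lssA_eq_maxfold (a : List Int) (c : Nat) (hc : c ≠ 0) :
    lssA a c = List.foldl max 1
      ((((List.range c).filter (fun i => decide (|a.getD i 0 - a.getD c 0| ≤ 1))).map
          (fun i => 1 + lssA a i))) := by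
  rw [lssA, if_neg hc]
  rw [pv_foldl_attach ((List.range c).reverse)
        (fun ans i => if |a.getD i 0 - a.getD c 0| ≤ 1 then max ans (1 + lssA a i) else ans) 1]
  rw [pv_loopA_eq (fun i => |a.getD i 0 - a.getD c 0| ≤ 1) (fun i => 1 + lssA a i)]
  rw [List.filter_reverse, List.map_reverse, pv_foldl_max_reverse]

-- B's table holds exactly A's values.
theorem pv_dp_spec (a : List Int) (m : Nat) :
    (List.range m).foldl
      (fun dp j =>
        dp ++ [ (List.range j).foldl
                  (fun best i =>
                    if |a.getD i 0 - a.getD j 0| ≤ 1 ∧ best < dp.getD i 0 + 1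
                    then dp.getD i 0 + 1 else best) 1 ]) []
      = (List.range m).map (fun i => lssA a i) := by
  induction m with
  | zero => rfl
  | succ m ih =>
    rw [List.range_succ, List.foldl_append, List.foldl_cons, List.foldl_nil, ih,
        List.map_append, List.map_cons, List.map_nil]
    congr 1
    -- the new cell equals lssA a m
    have hfold :
        (List.range m).foldl
          (fun best i =>
            if |a.getD i 0 - a.getD m 0| ≤ 1 ∧
                best < ((List.range m).map (fun i => lssA a i)).getD i 0 + 1
            then ((List.range m).map (fun i => lssA a i)).getD i 0 + 1 else best) 1
        = (List.range m).foldl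
          (fun best i =>
            if |a.getD i 0 - a.getD m 0| ≤ 1 ∧ best < 1 + lssA a i
            then 1 + lssA a i else best) 1 := by
      apply PySem.List.foldl_congr_mem
      intro b i hi
      rw [pv_getD_map_range _ _ _ (List.mem_range.mp hi)]
      exact pv_if_shift _ _ _
    by_cases hm : m = 0
    · subst hm; rw [lssA]; rfl
    · rw [hfold, pv_loopB_eq (fun i => |a.getD i 0 - a.getD m 0| ≤ 1) (fun i => 1 + lssA a i),
          pv_lssA_eq_maxfold a m hm]

theorem pv_alt_eq (a : List Int) (curr : Int) :
    lssLengthEndingHere a curr = lssLengthEndingHere_alt a curr := by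
  unfold lssLengthEndingHere lssLengthEndingHere_alt
  by_cases h0 : curr = 0
  · simp [h0]
  · by_cases hneg : curr < 0
    · have hle : curr ≤ 0 := by omega
      rw [if_neg h0, if_pos hneg, if_pos hle]
    · have hle : ¬ curr ≤ 0 := by omega
      rw [if_neg h0, if_neg hneg, if_neg hle]
      show lssA a curr.toNat =
        ((List.range (curr.toNat + 1)).foldl
          (fun dp j =>
            dp ++ [ (List.range j).foldl
                      (fun best i =>
                        if |a.getD i 0 - a.getD j 0| ≤ 1 ∧ best < dp.getD i 0 + 1
                        then dp.getD i 0 + 1 else best) 1 ]) []).getD curr.toNat 1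
      rw [pv_dp_spec a (curr.toNat + 1)]
      rw [List.range_succ, List.map_append, List.map_cons, List.map_nil,
          pv_getD_snoc_range]

-- ===== VERDICT (by name: the statement is the Claim_ definition above) =====
theorem lssLengthEndingHere_spec : Claim_equal_lssLengthEndingHere := by
  intro a curr _ _
  unfold Spec_lssLengthEndingHere
  exact pv_alt_eq a curr
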